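-- pv_equiv track=rewrite | github.com/sp25126/CYNO | tools/application_tools.py | _prioritize_gaps
-- ===== SOURCE A (Python) =====
-- from typing import Dict, Any, List, Optional
--
-- def _prioritize_gaps(gaps: List[str], job_title: str) -> List[Dict]:
--     """Prioritize skill gaps by importance."""
--     # High priority keywords based on common job patterns
--     high_priority = ["python", "javascript", "sql", "aws", "react", "machine learning", "docker"]
--
--     prioritized = []
--     for gap in gaps:
--         priority = "high" if any(hp in gap.lower() for hp in high_priority) else "medium"
--         prioritized.append({"skill": gap, "priority": priority})
--
--     # Sort by priority
--     prioritized.sort(key=lambda x: 0 if x["priority"] == "high" else 1)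
--
--     return prioritized[:7]
-- ===== SOURCE B (Python) =====
-- def _prioritize_gaps(gaps, job_title):
--     """Prioritize skill gaps by importance (bucket partition instead of stable sort)."""
--     high_priority = ["python", "javascript", "sql", "aws", "react", "machine learning", "docker"]
--
--     high = []
--     medium = []
--     for gap in gaps:
--         if any(hp in gap.lower() for hp in high_priority):
--             high.append({"skill": gap, "priority": "high"})
--         else:
--             medium.append({"skill": gap, "priority": "medium"})
--
--     return (high + medium)[:7]
-- ===== Notes on version B (the rewrite author's own statement) =====
-- stated objective: alternative
-- what changed: Replaces the build-then-stable-sort-on-a-0/1-key pass with a single-pass partition into high/medium buckets concatenated in order; the stable sort on a two-valued key yields exactly that partition order.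
import Mathlib
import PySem

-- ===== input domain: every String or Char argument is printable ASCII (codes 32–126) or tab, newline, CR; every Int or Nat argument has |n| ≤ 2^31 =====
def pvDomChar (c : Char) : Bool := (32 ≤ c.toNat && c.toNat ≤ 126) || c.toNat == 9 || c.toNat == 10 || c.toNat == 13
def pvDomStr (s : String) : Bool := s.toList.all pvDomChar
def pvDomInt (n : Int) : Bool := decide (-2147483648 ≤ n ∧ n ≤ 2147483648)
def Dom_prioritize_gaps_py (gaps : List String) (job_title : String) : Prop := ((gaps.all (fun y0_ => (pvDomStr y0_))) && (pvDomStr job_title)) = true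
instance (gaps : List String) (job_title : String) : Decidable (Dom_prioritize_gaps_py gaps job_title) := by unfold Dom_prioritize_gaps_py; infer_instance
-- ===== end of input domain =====

-- B replaces A's build-then-stable-sort-on-a-0/1-key with a one-pass high/medium bucket partition (alternative algorithm, same result).

-- ===== PORT A =====
def pvHighPriority : List String :=
  ["python", "javascript", "sql", "aws", "react", "machine learning", "docker"]

def prioritize_gaps_py (gaps : List String) (job_title : String) : List (List (String × String)) :=
  let prioritized := gaps.foldl (fun acc gap =>
    let priority :=
      if pvHighPriority.any (fun hp => PySem.Str.isIn hp (PySem.Str.lower gap)) then "high" else "medium"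
    acc ++ [[("skill", gap), ("priority", priority)]]) []
  -- x["priority"] always succeeds here (every dict built above has the key); getD is exact on these inputs
  let sortedL := PySem.List.sorted prioritized
      (fun x => if PySem.Dict.getD (PySem.Dict.mk x) "priority" "" == "high" then (0 : Int) else 1) false
  PySem.List.slice sortedL none (some 7)

-- ===== PORT B =====
def pvIsHighGap (gap : String) : Bool :=
  pvHighPriority.any (fun hp => PySem.Str.isIn hp (PySem.Str.lower gap))

def prioritize_gaps_py_alt (gaps : List String) (job_title : String) : List (List (String × String)) :=
  let p := gaps.foldl
    (fun (acc : List (List (String × String)) × List (List (String × String))) gap =>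
      if pvIsHighGap gap then (acc.1 ++ [[("skill", gap), ("priority", "high")]], acc.2)
      else (acc.1, acc.2 ++ [[("skill", gap), ("priority", "medium")]]))
    ([], [])
  (p.1 ++ p.2).take 7

-- ===== PRECONDITION & SPEC =====
def Spec_prioritize_gaps_py (gaps : List String) (job_title : String) (out : List (List (String × String))) : Prop := out = prioritize_gaps_py_alt gaps job_title
instance (gaps : List String) (job_title : String) (out : List (List (String × String))) : Decidable (Spec_prioritize_gaps_py gaps job_title out) := by unfold Spec_prioritize_gaps_py; infer_instance

-- ===== CLAIM (what is proved, stated in full; the proofs are below) =====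
def Claim_equal_prioritize_gaps_py : Prop := ∀ (gaps : List String) (job_title : String), Dom_prioritize_gaps_py gaps job_title → Spec_prioritize_gaps_py gaps job_title (prioritize_gaps_py gaps job_title)

-- ===== LEMMAS AND PROOFS =====

-- the dict A builds for a gap
def pvDA (g : String) : List (String × String) :=
  [("skill", g), ("priority", if pvIsHighGap g then "high" else "medium")]

-- A's sort key
def pvKey (x : List (String × String)) : Int :=
  if PySem.Dict.getD (PySem.Dict.mk x) "priority" "" == "high" then 0 else 1

def pvBef (a b : List (String × String)) : Bool := decide (pvKey a < pvKey b)

theorem pvKey_dA (g : String) : pvKey (pvDA g) = if pvIsHighGap g then 0 else 1 := by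
  by_cases h : pvIsHighGap g <;>
    simp [pvKey, pvDA, h, PySem.Dict.getD, PySem.Dict.get?]

theorem insertBy_mid {α : Type} (bef : α → α → Bool)
    (x : α) (H M : List α)
    (h1 : ∀ y ∈ H, bef x y = false)
    (h2 : ∀ m t, M = m :: t → bef x m = true) :
    PySem.List.insertBy bef x (H ++ M) = H ++ x :: M := by
  induction H with
  | nil =>
    cases M with
    | nil => simp [PySem.List.insertBy]
    | cons m t => simp [PySem.List.insertBy, h2 m t rfl]
  | cons h hs ih =>
    have hf : bef x h = false := h1 h (by simp)
    simp only [List.cons_append, PySem.List.insertBy, hf, Bool.false_eq_true, if_false]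
    rw [ih (fun y hy => h1 y (by simp [hy]))]

theorem pvSortLemma : ∀ (gaps : List String) (H M : List (List (String × String))),
    (∀ y ∈ H, pvKey y = 0) → (∀ y ∈ M, pvKey y = 1) →
    gaps.foldl (fun acc g => PySem.List.insertBy pvBef (pvDA g) acc) (H ++ M)
      = (H ++ (gaps.filter pvIsHighGap).map pvDA)
        ++ (M ++ (gaps.filter (fun g => !pvIsHighGap g)).map pvDA) := by
  intro gaps
  induction gaps with
  | nil => intro H M _ _; simp
  | cons g rest ih =>
    intro H M hH hM
    by_cases hg : pvIsHighGap g
    · have hins : PySem.List.insertBy pvBef (pvDA g) (H ++ M) = H ++ pvDA g :: M := by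
        apply insertBy_mid
        · intro y hy; simp [pvBef, pvKey_dA, hg, hH y hy]
        · intro m t hmt; simp [pvBef, pvKey_dA, hg, hM m (by simp [hmt])]
      have : H ++ pvDA g :: M = (H ++ [pvDA g]) ++ M := by simp
      rw [List.foldl_cons, hins, this,
        ih (H ++ [pvDA g]) M
          (by intro y hy
              rcases List.mem_append.mp hy with h | h
              · exact hH y h
              · simp at h; simp [h, pvKey_dA, hg])
          hM]
      simp [hg]
    · have hins : PySem.List.insertBy pvBef (pvDA g) (H ++ M) = (H ++ M) ++ [pvDA g] := by
        apply PySem.List.insertBy_of_forall_not_before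
        intro y hy
        rcases List.mem_append.mp hy with h | h
        · simp [pvBef, pvKey_dA, hg, hH y h]
        · simp [pvBef, pvKey_dA, hg, hM y h]
      have : (H ++ M) ++ [pvDA g] = H ++ (M ++ [pvDA g]) := by simp
      rw [List.foldl_cons, hins, this,
        ih H (M ++ [pvDA g]) hH
          (by intro y hy
              rcases List.mem_append.mp hy with h | h
              · exact hM y h
              · simp at h; simp [h, pvKey_dA, hg])]
      simp [hg]

theorem pvFoldAppend {α β : Type} (f : α → β) :
    ∀ (l : List α) (init : List β),
      l.foldl (fun acc x => acc ++ [f x]) init = init ++ l.map f := by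
  intro l
  induction l with
  | nil => intro init; simp
  | cons a t ih => intro init; simp [ih]

theorem pvA_char (gaps : List String) (job_title : String) :
    prioritize_gaps_py gaps job_title
      = (((gaps.filter pvIsHighGap).map pvDA)
          ++ ((gaps.filter (fun g => !pvIsHighGap g)).map pvDA)).take 7 := by
  have h1 : prioritize_gaps_py gaps job_title
      = PySem.List.slice
          (PySem.List.sorted (gaps.foldl (fun acc gap => acc ++ [pvDA gap]) []) pvKey false)
          none (some 7) := rfl
  rw [h1, pvFoldAppend pvDA gaps [], List.nil_append,
    PySem.List.sorted_eq_foldl_insertBy]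
  simp only [List.foldl_map]
  rw [show (fun (acc : List (List (String × String))) x =>
        PySem.List.insertBy (fun a b => decide (pvKey a < pvKey b)) (pvDA x) acc)
      = (fun acc g => PySem.List.insertBy pvBef (pvDA g) acc) from rfl]
  have hmain := pvSortLemma gaps [] [] (by simp) (by simp)
  simp only [List.nil_append] at hmain
  rw [hmain, PySem.List.slice_to]
  · simp
  · norm_num

theorem pvBfold :
    ∀ (gaps : List String) (h m : List (List (String × String))),
      gaps.foldl
        (fun (acc : List (List (String × String)) × List (List (String × String))) gap =>
          if pvIsHighGap gap then (acc.1 ++ [[("skill", gap), ("priority", "high")]], acc.2)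
          else (acc.1, acc.2 ++ [[("skill", gap), ("priority", "medium")]])) (h, m)
        = (h ++ (gaps.filter pvIsHighGap).map pvDA,
           m ++ (gaps.filter (fun g => !pvIsHighGap g)).map pvDA) := by
  intro gaps
  induction gaps with
  | nil => intro h m; simp
  | cons a t ih =>
    intro h m
    by_cases ha : pvIsHighGap a <;>
      simp [ha, ih, pvDA]

theorem pvB_char (gaps : List String) (job_title : String) :
    prioritize_gaps_py_alt gaps job_title
      = (((gaps.filter pvIsHighGap).map pvDA)
          ++ ((gaps.filter (fun g => !pvIsHighGap g)).map pvDA)).take 7 := by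
  unfold prioritize_gaps_py_alt
  rw [pvBfold gaps [] []]
  simp

-- ===== VERDICT (by name: the statement is the Claim_ definition above) =====
theorem prioritize_gaps_py_spec : Claim_equal_prioritize_gaps_py := by
  intro gaps job_title _
  unfold Spec_prioritize_gaps_py
  rw [pvA_char, pvB_char]
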